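-- pv_equiv track=rewrite | github.com/zachary-lz-glm/prd-tools | scripts/build-index.py | _bracket_balance
-- ===== SOURCE A (Python) =====
-- def _bracket_balance(line):
--     """Count net open brackets in a line, skipping string contents."""
--     parens = 0
--     angles = 0
--     i, n = 0, len(line)
--     while i < n:
--         c = line[i]
--         if c in ('"', "'", '`'):
--             q = c
--             i += 1
--             while i < n and line[i] != q:
--                 if line[i] == '\\':
--                     i += 1
--                 i += 1
--             i += 1
--             continue
--         if c == '(':
--             parens += 1
--         elif c == ')':
--             parens -= 1
--         elif c == '<':
--             if i + 1 < n and line[i + 1] not in ('=', ' '):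
--                 angles += 1
--         elif c == '>':
--             if angles > 0:
--                 angles -= 1
--         i += 1
--     return parens + angles
-- ===== SOURCE B (Python) =====
-- def _bracket_balance(line):
--     """Count net open brackets in a line, skipping string contents."""
--     parens = 0
--     angles = 0
--     in_string = None
--     escaped = False
--     n = len(line)
--     for i, c in enumerate(line):
--         if in_string is not None:
--             if escaped:
--                 escaped = False
--             elif c == '\\':
--                 escaped = True
--             elif c == in_string:
--                 in_string = None
--         elif c in ('"', "'", '`'):
--             in_string = c
--         elif c == '(':
--             parens += 1
--         elif c == ')':
--             parens -= 1
--         elif c == '<':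
--             if i + 1 < n and line[i + 1] not in ('=', ' '):
--                 angles += 1
--         elif c == '>':
--             if angles > 0:
--                 angles -= 1
--     return parens + angles
-- ===== Notes on version B (the rewrite author's own statement) =====
-- stated objective: alternative
-- what changed: Replaces A's index-driven outer loop with a nested inner string-skipping while-loop by a single flat scan over the characters that carries in_string/escaped state variables (a finite state machine); same O(n) cost.
import Mathlib
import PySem

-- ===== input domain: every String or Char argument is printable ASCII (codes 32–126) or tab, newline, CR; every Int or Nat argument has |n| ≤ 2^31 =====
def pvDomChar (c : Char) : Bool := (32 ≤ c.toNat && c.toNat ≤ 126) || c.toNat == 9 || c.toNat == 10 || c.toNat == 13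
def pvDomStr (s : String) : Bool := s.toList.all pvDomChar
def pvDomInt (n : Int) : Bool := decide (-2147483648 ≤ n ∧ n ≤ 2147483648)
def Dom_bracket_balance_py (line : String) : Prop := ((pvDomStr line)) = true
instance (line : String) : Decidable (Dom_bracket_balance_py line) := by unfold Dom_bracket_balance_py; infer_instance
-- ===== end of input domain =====

-- B replaces A's nested string-skipping inner loop by a single flat scan carrying
-- in_string/escaped state (alternative decomposition; same cost).

-- ===== PORT A =====
-- A's inner `while i < n and line[i] != q` loop: returns the suffix after the closing quote.
def pvSkipA (q : Char) : List Char → List Char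
  | [] => []
  | c :: rest =>
    if c = q then rest
    else if c = '\\' then
      match rest with
      | [] => []
      | _ :: r => pvSkipA q r
    else pvSkipA q rest

theorem pvSkipA_length_le (q : Char) (l : List Char) : (pvSkipA q l).length ≤ l.length := by
  induction l using pvSkipA.induct q with
  | case1 => simp [pvSkipA]
  | case2 r => rw [pvSkipA.eq_def]; simp
  | case3 h => rw [pvSkipA.eq_def]; simp [h]
  | case4 head r h ih => rw [pvSkipA.eq_def]; simp [h]; omega
  | case5 head r h h2 ih => rw [pvSkipA.eq_def]; simp [h, h2]; omega

-- A's outer while-loop, position by position over the remaining characters.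
def pvLoopA : List Char → Int → Int → Int
  | [], parens, angles => parens + angles
  | c :: rest, parens, angles =>
    if c = '"' ∨ c = '\'' ∨ c = '`' then
      pvLoopA (pvSkipA c rest) parens angles
    else if c = '(' then pvLoopA rest (parens + 1) angles
    else if c = ')' then pvLoopA rest (parens - 1) angles
    else if c = '<' then
      pvLoopA rest parens
        (match rest with
         | c2 :: _ => if ¬ (c2 = '=' ∨ c2 = ' ') then angles + 1 else angles
         | [] => angles)
    else if c = '>' then
      pvLoopA rest parens (if angles > 0 then angles - 1 else angles)
    else pvLoopA rest parens angles
termination_by l => l.length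
decreasing_by
  · exact Nat.lt_succ_of_le (pvSkipA_length_le _ _)
  all_goals simp

def bracket_balance_py (line : String) : Int := pvLoopA line.toList 0 0

-- ===== PORT B =====
-- B's single flat scan: state (parens, angles, in_string : Option Char, escaped : Bool);
-- the `line[i+1]` lookahead reads the head of the remaining characters.
def pvLoopB : List Char → Int → Int → Option Char → Bool → Int
  | [], parens, angles, _, _ => parens + angles
  | c :: rest, parens, angles, some q, escaped =>
    if escaped then pvLoopB rest parens angles (some q) false
    else if c = '\\' then pvLoopB rest parens angles (some q) true
    else if c = q then pvLoopB rest parens angles none false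
    else pvLoopB rest parens angles (some q) false
  | c :: rest, parens, angles, none, _ =>
    if c = '"' ∨ c = '\'' ∨ c = '`' then pvLoopB rest parens angles (some c) false
    else if c = '(' then pvLoopB rest (parens + 1) angles none false
    else if c = ')' then pvLoopB rest (parens - 1) angles none false
    else if c = '<' then
      pvLoopB rest parens
        (match rest with
         | c2 :: _ => if ¬ (c2 = '=' ∨ c2 = ' ') then angles + 1 else angles
         | [] => angles)
        none false
    else if c = '>' then
      pvLoopB rest parens (if angles > 0 then angles - 1 else angles) none false
    else pvLoopB rest parens angles none false

def bracket_balance_py_alt (line : String) : Int := pvLoopB line.toList 0 0 none false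

-- ===== PRECONDITION & SPEC =====
def Spec_bracket_balance_py (line : String) (out : Int) : Prop := out = bracket_balance_py_alt line
instance (line : String) (out : Int) : Decidable (Spec_bracket_balance_py line out) := by unfold Spec_bracket_balance_py; infer_instance

-- ===== CLAIM (what is proved, stated in full; the proofs are below) =====
def Claim_equal_bracket_balance_py : Prop := ∀ (line : String), Dom_bracket_balance_py line → Spec_bracket_balance_py line (bracket_balance_py line)

-- ===== LEMMAS AND PROOFS =====
-- While inside a string opened by quote q (never a backslash), B's flat scan agrees
-- with A's inner skip loop followed by the scan out of string mode.
theorem pvLoopB_skip (q : Char) (hq : ¬ q = '\\') (l : List Char) :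
    ∀ parens angles, pvLoopB l parens angles (some q) false =
      pvLoopB (pvSkipA q l) parens angles none false := by
  induction l using pvSkipA.induct q with
  | case1 => intro p a; rw [pvSkipA.eq_def]; simp [pvLoopB]
  | case2 r =>
    intro p a
    rw [pvSkipA.eq_def]
    simp [pvLoopB, hq]
  | case3 h =>
    intro p a
    rw [pvSkipA.eq_def]
    simp [pvLoopB, fun hc : ('\\' : Char) = q => h hc]
  | case4 head r h ih =>
    intro p a
    rw [pvSkipA.eq_def]
    have h' : ¬ ('\\' : Char) = q := h
    simp only [pvLoopB, h']
    simp [pvLoopB, h']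
    exact ih p a
  | case5 head r h h2 ih =>
    intro p a
    rw [pvSkipA.eq_def]
    simp [pvLoopB, h, h2]
    exact ih p a

theorem pvLoopA_eq_pvLoopB (l : List Char) (parens angles : Int) :
    pvLoopA l parens angles = pvLoopB l parens angles none false := by
  induction l, parens, angles using pvLoopA.induct with
  | case1 p a => simp [pvLoopA, pvLoopB]
  | case2 c rest p a h ih =>
    rw [pvLoopA.eq_def]
    simp only [pvLoopB, if_pos h]
    rw [pvLoopB_skip c (by rcases h with h|h|h <;> simp [h]) rest]
    exact ih
  | case3 rest p a h ih =>
    rw [pvLoopA.eq_def]; simp only [pvLoopB, if_neg h]; exact ih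
  | case4 rest p a h h2 ih =>
    rw [pvLoopA.eq_def]; simp only [pvLoopB, if_neg h, if_neg h2]; exact ih
  | case5 rest p a h h2 h3 ih =>
    rw [pvLoopA.eq_def]; simp only [pvLoopB, if_neg h, if_neg h2, if_neg h3]; exact ih
  | case6 rest p a h h2 h3 h4 ih =>
    rw [pvLoopA.eq_def]; simp only [pvLoopB, if_neg h, if_neg h2, if_neg h3, if_neg h4]; exact ih
  | case7 c rest p a h h2 h3 h4 h5 ih =>
    rw [pvLoopA.eq_def]
    simp only [pvLoopB, if_neg h, if_neg h2, if_neg h3, if_neg h4, if_neg h5]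
    exact ih

-- ===== VERDICT (by name: the statement is the Claim_ definition above) =====
theorem bracket_balance_py_spec : Claim_equal_bracket_balance_py := by
  intro line _
  unfold Spec_bracket_balance_py bracket_balance_py bracket_balance_py_alt
  exact pvLoopA_eq_pvLoopB _ 0 0
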